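-- pv_equiv track=rewrite | github.com/juchemGDG/NIT_Bibliotheken | TOF/nitbw_tof.py | _encode_timeout
-- ===== SOURCE A (Python) =====
-- def _encode_timeout(timeout_mclks):
--     """Kodiert MCLKS in das 16-Bit Registerformat."""
--     if timeout_mclks <= 0:
--         return 0
--     ls_byte = timeout_mclks - 1
--     ms_byte = 0
--     while ls_byte > 0xFF:
--         ls_byte >>= 1
--         ms_byte += 1
--     return (ms_byte << 8) | (ls_byte & 0xFF)
-- ===== SOURCE B (Python) =====
-- def _encode_timeout(timeout_mclks):
--     """Kodiert MCLKS in das 16-Bit Registerformat."""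
--     if timeout_mclks <= 0:
--         return 0
--     v = timeout_mclks - 1
--     ms_byte = max(0, v.bit_length() - 8)
--     return (ms_byte << 8) | ((v >> ms_byte) & 0xFF)
-- ===== Notes on version B (the rewrite author's own statement) =====
-- stated objective: idiomatic
-- what changed: The shift-until-it-fits while loop is replaced by a closed-form computation: ms_byte = max(0, (timeout_mclks-1).bit_length() - 8) and a single right shift, no loop.
import Mathlib
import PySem

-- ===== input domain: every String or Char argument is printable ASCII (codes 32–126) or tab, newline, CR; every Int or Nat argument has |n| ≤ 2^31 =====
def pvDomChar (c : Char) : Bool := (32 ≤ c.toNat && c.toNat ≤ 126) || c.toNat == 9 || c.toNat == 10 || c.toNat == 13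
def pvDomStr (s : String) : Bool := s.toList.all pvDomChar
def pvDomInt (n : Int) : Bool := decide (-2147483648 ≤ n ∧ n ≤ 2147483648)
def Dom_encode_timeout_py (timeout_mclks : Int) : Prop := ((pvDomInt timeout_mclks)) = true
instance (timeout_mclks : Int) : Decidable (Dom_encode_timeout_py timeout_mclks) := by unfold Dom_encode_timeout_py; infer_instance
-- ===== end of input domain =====

-- B replaces A's shift-until-≤0xFF while loop by a closed-form bit_length computation (idiomatic, no loop).

-- ===== PORT A =====
-- the `while ls_byte > 0xFF: ls_byte >>= 1; ms_byte += 1` loop of A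
def encLoopA (ls ms : Int) : Int × Int :=
  if 255 < ls then encLoopA (ls >>> (1 : Nat)) (ms + 1) else (ls, ms)
termination_by ls.toNat
decreasing_by
  rw [Int.shiftRight_eq_div_pow]
  norm_num
  omega

def encode_timeout_py (timeout_mclks : Int) : Int :=
  if timeout_mclks ≤ 0 then 0
  else
    let p := encLoopA (timeout_mclks - 1) 0
    PySem.Int.bor (p.2 <<< (8 : Nat)) (PySem.Int.band p.1 0xFF)

-- ===== PORT B =====
def encode_timeout_py_alt (timeout_mclks : Int) : Int :=
  if timeout_mclks ≤ 0 then 0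
  else
    let v := timeout_mclks - 1
    -- Nat truncated subtraction is exactly Python's max(0, v.bit_length() - 8)
    let ms : Nat := PySem.Int.bitLength v - 8
    PySem.Int.bor ((ms : Int) <<< (8 : Nat)) (PySem.Int.band (v >>> ms) 0xFF)

-- ===== PRECONDITION & SPEC =====
def Spec_encode_timeout_py (timeout_mclks : Int) (out : Int) : Prop := out = encode_timeout_py_alt timeout_mclks
instance (timeout_mclks : Int) (out : Int) : Decidable (Spec_encode_timeout_py timeout_mclks out) := by unfold Spec_encode_timeout_py; infer_instance

-- ===== CLAIM (what is proved, stated in full; the proofs are below) =====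
def Claim_equal_encode_timeout_py : Prop := ∀ (timeout_mclks : Int), Dom_encode_timeout_py timeout_mclks → Spec_encode_timeout_py timeout_mclks (encode_timeout_py timeout_mclks)

-- ===== LEMMAS AND PROOFS =====

theorem encLoopA_eq (n : Nat) (ls ms : Int) (hn : ls.toNat = n) (h0 : 0 ≤ ls) :
    encLoopA ls ms =
      (ls >>> (PySem.Int.bitLength ls - 8), ms + ((PySem.Int.bitLength ls - 8 : Nat) : Int)) := by
  induction n using Nat.strong_induction_on generalizing ls ms with
  | _ n ih =>
    rw [encLoopA]
    by_cases h : 255 < ls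
    · rw [if_pos h]
      have h2 : ls >>> (1 : Nat) = ls / 2 := by
        rw [Int.shiftRight_eq_div_pow]; norm_num
      have hfd : PySem.Int.floordiv ls 2 = ls / 2 :=
        PySem.Int.floordiv_eq_ediv_of_pos (by omega)
      have hbl : PySem.Int.bitLength ls = PySem.Int.bitLength (ls / 2) + 1 := by
        rw [PySem.Int.bitLength_of_pos (by omega), hfd]
      have hdiv0 : (0:Int) ≤ ls / 2 := by omega
      have hdivlt : (ls / 2).toNat < n := by omega
      have hbl2 : 8 ≤ PySem.Int.bitLength (ls / 2) := by
        by_contra hc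
        have := PySem.Int.lt_two_pow_bitLength (ls / 2)
        have h7 : PySem.Int.bitLength (ls / 2) ≤ 7 := by omega
        have : (ls / 2).natAbs < 2 ^ 7 :=
          lt_of_lt_of_le this (Nat.pow_le_pow_right (by norm_num) h7)
        omega
      rw [h2, hbl, ih _ hdivlt _ _ rfl hdiv0]
      rw [Prod.mk.injEq]; refine ⟨?_, ?_⟩
      · rw [Int.shiftRight_eq_div_pow, Int.shiftRight_eq_div_pow,
            Int.ediv_ediv_of_nonneg]
        congr 1
        push_cast
        rw [← pow_succ']
        congr 1
        omega
        norm_num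
      · have : (PySem.Int.bitLength (ls / 2) + 1 - 8) = (PySem.Int.bitLength (ls / 2) - 8) + 1 := by
          omega
        rw [this]
        push_cast
        ring
    · rw [if_neg h]
      have hbl : PySem.Int.bitLength ls ≤ 8 := by
        by_cases hz : ls = 0
        · simp [hz]
        · by_contra hc
          have := PySem.Int.two_pow_bitLength_le ls hz
          have h8 : 8 ≤ PySem.Int.bitLength ls - 1 := by omega
          have : (2:Nat) ^ 8 ≤ 2 ^ (PySem.Int.bitLength ls - 1) :=
            Nat.pow_le_pow_right (by norm_num) h8
          omega
      have hk : PySem.Int.bitLength ls - 8 = 0 := by omega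
      rw [hk]
      simp [Int.shiftRight_eq_div_pow]

-- ===== VERDICT (by name: the statement is the Claim_ definition above) =====
theorem encode_timeout_py_spec : Claim_equal_encode_timeout_py := by
  intro t _
  unfold Spec_encode_timeout_py encode_timeout_py encode_timeout_py_alt
  by_cases h : t ≤ 0
  · simp [h]
  · simp only [if_neg h]
    rw [encLoopA_eq (t - 1).toNat (t - 1) 0 rfl (by omega)]
    simp
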